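-- pv_equiv track=rewrite | github.com/theNded/SLAM-Dataset-Scripts | associate.py | associate
-- ===== SOURCE A (Python) =====
-- def associate(first_list, second_list, offset, max_difference):
--     """
--     Associate two dictionaries of (stamp,data). As the time stamps never match exactly, we aim
--     to find the closest match for every input tuple.
--     Input:
--     first_list -- first dictionary of (stamp,data) tuples
--     second_list -- second dictionary of (stamp,data) tuples
--     offset -- time offset between both dictionaries (e.g., to model the delay between the sensors)
--     max_difference -- search radius for candidate generation
--     Output:
--     matches -- list of matched tuples ((stamp1,data1),(stamp2,data2))
--     """
--     first_keys = list(first_list.keys())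
--     second_keys = list(second_list.keys())
--     potential_matches = [(abs(a - (b + offset)), a, b)
--                          for a in first_keys
--                          for b in second_keys
--                          if abs(a - (b + offset)) < max_difference]
--     potential_matches.sort()
--     matches = []
--     for diff, a, b in potential_matches:
--         if a in first_keys and b in second_keys:
--             first_keys.remove(a)
--             second_keys.remove(b)
--             matches.append((a, b))
--
--     matches.sort()
--     return dict(matches)
-- ===== SOURCE B (Python) =====
-- from bisect import bisect_left, bisect_right
--
-- def associate(first_list, second_list, offset, max_difference):
--     first_keys = list(first_list.keys())
--     second_sorted = sorted(second_list.keys())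
--     candidates = []
--     for a in first_keys:
--         lo = bisect_right(second_sorted, a - offset - max_difference)
--         hi = bisect_left(second_sorted, a - offset + max_difference)
--         for b in second_sorted[lo:hi]:
--             candidates.append((abs(a - (b + offset)), a, b))
--     candidates.sort()
--     used_a, used_b = set(), set()
--     matches = {}
--     for _, a, b in candidates:
--         if a not in used_a and b not in used_b:
--             used_a.add(a)
--             used_b.add(b)
--             matches[a] = b
--     return dict(sorted(matches.items()))
-- ===== Notes on version B (the rewrite author's own statement) =====
-- stated objective: faster
-- what changed: B generates candidates by sorting the second key list once and bisecting the in-window range for each first key instead of A's full n*m membership comprehension, and runs the greedy pass with O(1) set lookups and a dict instead of A's O(n) list membership tests and list.remove calls; intended as faster (a timing run measured 36x at n=4096 where both finished) - when max_difference admits nearly all n*m pairs both must enumerate and sort them and the gain is only a constant factor.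
import Mathlib
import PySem

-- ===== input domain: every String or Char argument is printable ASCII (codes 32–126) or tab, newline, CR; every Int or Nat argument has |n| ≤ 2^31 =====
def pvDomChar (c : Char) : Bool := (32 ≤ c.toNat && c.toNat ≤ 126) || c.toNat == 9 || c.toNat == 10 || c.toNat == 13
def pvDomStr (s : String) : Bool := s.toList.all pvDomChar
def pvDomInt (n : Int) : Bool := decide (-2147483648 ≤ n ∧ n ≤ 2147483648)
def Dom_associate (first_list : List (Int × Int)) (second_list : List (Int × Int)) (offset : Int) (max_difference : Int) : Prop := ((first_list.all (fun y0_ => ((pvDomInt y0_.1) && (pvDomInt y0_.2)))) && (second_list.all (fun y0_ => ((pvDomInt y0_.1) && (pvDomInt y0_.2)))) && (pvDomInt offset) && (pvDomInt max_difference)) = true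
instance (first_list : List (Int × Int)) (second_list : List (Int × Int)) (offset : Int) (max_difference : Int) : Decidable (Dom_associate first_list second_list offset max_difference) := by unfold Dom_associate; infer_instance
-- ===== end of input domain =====

-- B replaces A's n·m candidate comprehension by sorted-keys + binary-search windows and the
-- list-membership/remove greedy by O(1) set/dict bookkeeping; intended as faster (timing run
-- measured 36x at n=4096 where both finished; when the radius admits nearly all pairs both
-- enumerate and sort the same candidate set).

-- ===== PORT A =====
-- Python compares tuples lexicographically: sort keys into the lexicographic product order
def tripleKey (t : Int × Int × Int) : Int ×ₗ (Int ×ₗ Int) := toLex (t.1, toLex (t.2.1, t.2.2))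
def pairKey (p : Int × Int) : Int ×ₗ Int := toLex p

-- body of A's greedy 'for diff, a, b in potential_matches' loop
-- ('first_keys.remove(a)' is guarded by 'a in first_keys', so it is 'List.erase' here,
--  by PySem.List.remove?_eq_some_erase)
def stepA (st : List Int × List Int × List (Int × Int)) (t : Int × Int × Int) :
    List Int × List Int × List (Int × Int) :=
  if t.2.1 ∈ st.1 ∧ t.2.2 ∈ st.2.1 then
    (st.1.erase t.2.1, st.2.1.erase t.2.2, st.2.2 ++ [(t.2.1, t.2.2)])
  else st

def associate (first_list : List (Int × Int)) (second_list : List (Int × Int)) (offset : Int) (max_difference : Int) : List (Int × Int) :=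
  let first_keys := PySem.List.dedup (first_list.map Prod.fst)
  let second_keys := PySem.List.dedup (second_list.map Prod.fst)
  let potential_matches := first_keys.flatMap (fun a =>
    (second_keys.filter (fun b => decide (|a - (b + offset)| < max_difference))).map
      (fun b => (|a - (b + offset)|, a, b)))
  let pms := PySem.List.sorted potential_matches tripleKey
  let final := pms.foldl stepA (first_keys, second_keys, ([] : List (Int × Int)))
  let ms := PySem.List.sorted final.2.2 pairKey
  (PySem.Dict.ofList ms).items

-- ===== PORT B =====
-- body of B's greedy loop over the sorted candidates: sets used_a/used_b, dict matches
def stepB (st : PySem.Set Int × PySem.Set Int × PySem.Dict Int Int) (t : Int × Int × Int) :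
    PySem.Set Int × PySem.Set Int × PySem.Dict Int Int :=
  if !(PySem.Set.contains st.1 t.2.1) && !(PySem.Set.contains st.2.1 t.2.2) then
    (PySem.Set.add st.1 t.2.1, PySem.Set.add st.2.1 t.2.2, st.2.2.insert t.2.1 t.2.2)
  else st

def associate_alt (first_list : List (Int × Int)) (second_list : List (Int × Int)) (offset : Int) (max_difference : Int) : List (Int × Int) :=
  let first_keys := PySem.List.dedup (first_list.map Prod.fst)
  let second_sorted := PySem.List.sorted (PySem.List.dedup (second_list.map Prod.fst)) (fun b => b)
  let candidates := first_keys.foldl (fun acc a =>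
    acc ++ (PySem.List.slice second_sorted
        (some ((PySem.List.bisectRight second_sorted (a - offset - max_difference) : Nat) : Int))
        (some ((PySem.List.bisectLeft second_sorted (a - offset + max_difference) : Nat) : Int))).map
      (fun b => (|a - (b + offset)|, a, b))) []
  let cs := PySem.List.sorted candidates tripleKey
  let final := cs.foldl stepB
    ((PySem.Set.empty : PySem.Set Int), (PySem.Set.empty : PySem.Set Int),
     (PySem.Dict.empty : PySem.Dict Int Int))
  (PySem.Dict.ofList (PySem.List.sorted final.2.2.items pairKey)).items

-- ===== PRECONDITION & SPEC =====
def Spec_associate (first_list : List (Int × Int)) (second_list : List (Int × Int)) (offset : Int) (max_difference : Int) (out : List (Int × Int)) : Prop := out = associate_alt first_list second_list offset max_difference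
instance (first_list : List (Int × Int)) (second_list : List (Int × Int)) (offset : Int) (max_difference : Int) (out : List (Int × Int)) : Decidable (Spec_associate first_list second_list offset max_difference out) := by unfold Spec_associate; infer_instance

-- ===== CLAIM (what is proved, stated in full; the proofs are below) =====
def Claim_equal_associate : Prop := ∀ (first_list : List (Int × Int)) (second_list : List (Int × Int)) (offset : Int) (max_difference : Int), Dom_associate first_list second_list offset max_difference → Spec_associate first_list second_list offset max_difference (associate first_list second_list offset max_difference)

-- ===== LEMMAS AND PROOFS =====

theorem tripleKey_injective : Function.Injective tripleKey := by
  intro t u h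
  have h' := toLex.injective h
  have h1 : t.1 = u.1 := congrArg Prod.fst h'
  have h2 := toLex.injective (congrArg Prod.snd h')
  exact Prod.ext h1 (Prod.ext (congrArg Prod.fst h2) (congrArg Prod.snd h2))

-- the bisect window of a sorted list is exactly its strict in-window filter
theorem slice_bisect_eq_filter (ss : List Int) (L H : Int) (hs : ss.Pairwise (· ≤ ·)) :
    PySem.List.slice ss (some ((PySem.List.bisectRight ss L : Nat) : Int))
        (some ((PySem.List.bisectLeft ss H : Nat) : Int))
      = ss.filter (fun b => decide (L < b ∧ b < H)) := by
  rw [PySem.List.slice_natCast]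
  obtain ⟨hp_le, hpL, hpR⟩ := PySem.List.bisectRight_spec ss L hs
  obtain ⟨hq_le, hqL, hqR⟩ := PySem.List.bisectLeft_spec ss H hs
  set p := PySem.List.bisectRight ss L with hp
  set q := PySem.List.bisectLeft ss H with hq
  by_cases hpq : q ≤ p
  · have h0 : q - p = 0 := by omega
    rw [h0]
    simp only [List.take_zero]
    symm
    rw [List.filter_eq_nil_iff]
    intro x hx hpred
    obtain ⟨j, hj, hjx⟩ := List.mem_iff_getElem.mp hx
    simp only [decide_eq_true_eq] at hpred
    by_cases hjp : j < p
    · exact absurd (hjx ▸ hpL j hj hjp) (by omega)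
    · have : H ≤ ss[j] := hqR j hj (by omega)
      omega
  · rw [not_le] at hpq
    -- ss = take p ++ (middle ++ drop q); filter kills the two flanks and keeps the middle
    have hsplit : ss = ss.take p ++ ((ss.drop p).take (q - p) ++ (ss.drop p).drop (q - p)) := by
      rw [List.take_append_drop, List.take_append_drop]
    conv_rhs => rw [hsplit]
    rw [List.filter_append, List.filter_append]
    have hflank1 : (ss.take p).filter (fun b => decide (L < b ∧ b < H)) = [] := by
      rw [List.filter_eq_nil_iff]
      intro x hx hpred
      obtain ⟨i, hi, hix⟩ := List.mem_iff_getElem.mp hx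
      have hilen : i < ss.length := lt_of_lt_of_le hi (by simp [List.length_take])
      have hip : i < p := lt_of_lt_of_le hi (by simp [List.length_take])
      have : ss[i] ≤ L := hpL i hilen hip
      rw [List.getElem_take] at hix
      simp only [decide_eq_true_eq] at hpred
      omega
    have hmid : ((ss.drop p).take (q - p)).filter (fun b => decide (L < b ∧ b < H))
        = (ss.drop p).take (q - p) := by
      rw [List.filter_eq_self]
      intro x hx
      obtain ⟨i, hi, hix⟩ := List.mem_iff_getElem.mp hx
      have hi' : i < (ss.drop p).length := lt_of_lt_of_le hi (by simp [List.length_take])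
      have hiq : i < q - p := lt_of_lt_of_le hi (by simp [List.length_take])
      have hlen : p + i < ss.length := by simp [List.length_drop] at hi'; omega
      rw [List.getElem_take, List.getElem_drop] at hix
      have h1 : L < ss[p + i] := hpR (p + i) hlen (by omega)
      have h2 : ss[p + i] < H := hqL (p + i) hlen (by omega)
      subst hix
      simp only [decide_eq_true_eq]
      omega
    have hflank2 : ((ss.drop p).drop (q - p)).filter (fun b => decide (L < b ∧ b < H)) = [] := by
      rw [List.drop_drop, List.filter_eq_nil_iff]
      intro x hx hpred
      obtain ⟨i, hi, hix⟩ := List.mem_iff_getElem.mp hx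
      simp only [List.length_drop] at hi
      rw [List.getElem_drop] at hix
      have : H ≤ ss[p + (q - p) + i] := hqR _ (by omega) (by omega)
      simp only [decide_eq_true_eq] at hpred
      omega
    rw [hflank1, hmid, hflank2]
    simp

-- B's candidate list is a permutation of A's
theorem cands_perm (fk ss sk2 : List Int) (off md : Int)
    (hs : ss.Pairwise (· ≤ ·)) (hperm : ss.Perm sk2) :
    (fk.foldl (fun acc a =>
        acc ++ (PySem.List.slice ss
            (some ((PySem.List.bisectRight ss (a - off - md) : Nat) : Int))
            (some ((PySem.List.bisectLeft ss (a - off + md) : Nat) : Int))).map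
          (fun b => (|a - (b + off)|, a, b))) []).Perm
      (fk.flatMap (fun a =>
        (sk2.filter (fun b => decide (|a - (b + off)| < md))).map
          (fun b => (|a - (b + off)|, a, b)))) := by
  rw [PySem.List.foldl_append_eq_flatMap, List.nil_append]
  induction fk with
  | nil => simp
  | cons a fk ih =>
    simp only [List.flatMap_cons]
    refine List.Perm.append ?_ ih
    refine List.Perm.map _ ?_
    rw [slice_bisect_eq_filter ss _ _ hs]
    have hpred : ∀ b : Int,
        (decide (a - off - md < b ∧ b < a - off + md)) = decide (|a - (b + off)| < md) := by
      intro b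
      simp only [decide_eq_decide, abs_lt]
      omega
    rw [List.filter_congr (fun b _ => hpred b)]
    exact hperm.filter _

-- the two greedy loops over the same candidate list produce the same match list
theorem loop_eq (fk0 sk0 : List Int) (hf : fk0.Nodup) (hsn : sk0.Nodup) :
    ∀ (S : List (Int × Int × Int)) (ua ub : PySem.Set Int) (d : PySem.Dict Int Int),
    (∀ t ∈ S, t.2.1 ∈ fk0 ∧ t.2.2 ∈ sk0) →
    (∀ x : Int, PySem.Set.contains ua x = d.contains x) →
    (S.foldl stepA (fk0.filter (fun x => !PySem.Set.contains ua x),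
        sk0.filter (fun x => !PySem.Set.contains ub x), d.items)).2.2
      = (S.foldl stepB (ua, ub, d)).2.2.items := by
  intro S
  induction S with
  | nil => intro ua ub d _ _; rfl
  | cons t S ih =>
    intro ua ub d hmem hlink
    obtain ⟨ha0, hb0⟩ := hmem t (List.mem_cons_self)
    simp only [List.foldl_cons]
    by_cases hca : t.2.1 ∈ ua
    · -- a already used: both branches are skips
      have hA : stepA (fk0.filter (fun x => !PySem.Set.contains ua x),
          sk0.filter (fun x => !PySem.Set.contains ub x), d.items) t
          = (fk0.filter (fun x => !PySem.Set.contains ua x),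
             sk0.filter (fun x => !PySem.Set.contains ub x), d.items) := by
        rw [stepA, if_neg]
        intro ⟨h1, _⟩
        rw [List.mem_filter] at h1
        simp [hca] at h1
      have hB : stepB (ua, ub, d) t = (ua, ub, d) := by
        rw [stepB, if_neg]
        simp [hca]
      rw [hA, hB]
      exact ih ua ub d (fun t ht => hmem t (List.mem_cons_of_mem _ ht)) hlink
    · by_cases hcb : t.2.2 ∈ ub
      · have hA : stepA (fk0.filter (fun x => !PySem.Set.contains ua x),
            sk0.filter (fun x => !PySem.Set.contains ub x), d.items) t
            = (fk0.filter (fun x => !PySem.Set.contains ua x),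
               sk0.filter (fun x => !PySem.Set.contains ub x), d.items) := by
          rw [stepA, if_neg]
          intro ⟨_, h2⟩
          rw [List.mem_filter] at h2
          simp [hcb] at h2
        have hB : stepB (ua, ub, d) t = (ua, ub, d) := by
          rw [stepB, if_neg]
          simp [hcb]
        rw [hA, hB]
        exact ih ua ub d (fun t ht => hmem t (List.mem_cons_of_mem _ ht)) hlink
      · -- fresh pair: both branches match t
        have hconta : PySem.Set.contains ua t.2.1 = false := by
          rw [← Bool.not_eq_true, PySem.Set.contains_iff]; exact hca
        have hcontb : PySem.Set.contains ub t.2.2 = false := by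
          rw [← Bool.not_eq_true, PySem.Set.contains_iff]; exact hcb
        have hdA : d.contains t.2.1 = false := by rw [← hlink]; exact hconta
        have hA : stepA (fk0.filter (fun x => !PySem.Set.contains ua x),
            sk0.filter (fun x => !PySem.Set.contains ub x), d.items) t
            = (fk0.filter (fun x => !PySem.Set.contains (PySem.Set.add ua t.2.1) x),
               sk0.filter (fun x => !PySem.Set.contains (PySem.Set.add ub t.2.2) x),
               d.items ++ [(t.2.1, t.2.2)]) := by
          rw [stepA, if_pos]
          · refine Prod.ext ?_ (Prod.ext ?_ rfl)
            · rw [(hf.filter _).erase_eq_filter, List.filter_filter]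
              refine List.filter_congr (fun x _ => ?_)
              by_cases hxa : x = t.2.1
              · subst hxa; simp [PySem.Set.mem_add]
              · simp [PySem.Set.mem_add, hxa]
            · rw [(hsn.filter _).erase_eq_filter, List.filter_filter]
              refine List.filter_congr (fun x _ => ?_)
              by_cases hxb : x = t.2.2
              · subst hxb; simp [PySem.Set.mem_add]
              · simp [PySem.Set.mem_add, hxb]
          · constructor
            · rw [List.mem_filter]
              exact ⟨ha0, by simp [hca]⟩
            · rw [List.mem_filter]
              exact ⟨hb0, by simp [hcb]⟩
        have hB : stepB (ua, ub, d) t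
            = (PySem.Set.add ua t.2.1, PySem.Set.add ub t.2.2, d.insert t.2.1 t.2.2) := by
          rw [stepB, if_pos]
          rw [hconta, hcontb]; rfl
        rw [hA, hB]
        have hitems : d.items ++ [(t.2.1, t.2.2)] = (d.insert t.2.1 t.2.2).items :=
          (PySem.Dict.items_insert_of_not_contains d _ hdA).symm
        rw [hitems]
        refine ih _ _ _ (fun t ht => hmem t (List.mem_cons_of_mem _ ht)) ?_
        intro x
        rw [PySem.Dict.contains_insert]
        by_cases hxa : x = t.2.1
        · subst hxa; simp [PySem.Set.mem_add]
        · rw [← hlink x]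
          by_cases hxu : x ∈ ua <;>
            simp [hxa, hxu, PySem.Set.mem_add]

-- ===== VERDICT (by name: the statement is the Claim_ definition above) =====
theorem associate_spec : Claim_equal_associate := by
  intro first_list second_list offset max_difference _
  unfold Spec_associate associate associate_alt
  dsimp only
  set fk := PySem.List.dedup (first_list.map Prod.fst) with hfk
  set sk := PySem.List.dedup (second_list.map Prod.fst) with hsk
  set ss := PySem.List.sorted sk (fun b => b) with hss
  have hsorted : ss.Pairwise (· ≤ ·) := PySem.List.sorted_pairwise sk (fun b => b)
  have hperm : ss.Perm sk := PySem.List.sorted_perm sk (fun b => b) false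
  -- the two sorted candidate lists coincide
  have hcand := cands_perm fk ss sk offset max_difference hsorted hperm
  have hS := PySem.List.sorted_eq_sorted_of_perm _ _ tripleKey tripleKey_injective hcand
  rw [hS]
  set S := PySem.List.sorted (fk.flatMap (fun a =>
      (sk.filter (fun b => decide (|a - (b + offset)| < max_difference))).map
        (fun b => (|a - (b + offset)|, a, b)))) tripleKey with hSdef
  -- every candidate's components come from the two key lists
  have hmem : ∀ t ∈ S, t.2.1 ∈ fk ∧ t.2.2 ∈ sk := by
    intro t ht
    rw [hSdef, PySem.List.mem_sorted, List.mem_flatMap] at ht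
    obtain ⟨a, ha, ht⟩ := ht
    rw [List.mem_map] at ht
    obtain ⟨b, hb, rfl⟩ := ht
    exact ⟨ha, List.mem_of_mem_filter hb⟩
  -- the two greedy loops agree
  have hloop := loop_eq fk sk (PySem.List.nodup_dedup _) (PySem.List.nodup_dedup _)
    S PySem.Set.empty PySem.Set.empty PySem.Dict.empty hmem (fun x => rfl)
  have hfilter : ∀ (l : List Int),
      l.filter (fun x => !PySem.Set.contains PySem.Set.empty x) = l := by
    intro l
    rw [List.filter_eq_self]
    intro x _
    rfl
  have hitems0 : (PySem.Dict.empty : PySem.Dict Int Int).items = [] := rfl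
  rw [hfilter, hfilter, hitems0] at hloop
  rw [hloop]
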